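-- pv_equiv track=rewrite | github.com/asianhaydenxd/arcpy | src/parse.py | make_fraction
-- ===== SOURCE A (Python) =====
-- def make_fraction(string):
--     dividend = ""
--     divisor = 1
--     point_met = False
--     for char in string:
--         if char in "1234567890":
--             dividend += char
--             if point_met: divisor *= 10
--         if char == ".":
--             point_met = True
--     return (int(dividend), divisor)
-- ===== SOURCE B (Python) =====
-- def make_fraction(string):
--     int_part, _, frac_part = string.partition('.')
--     digits = '0123456789'
--     int_digits = [c for c in int_part if c in digits]
--     frac_digits = [c for c in frac_part if c in digits]
--     return (int(''.join(int_digits + frac_digits)), 10 ** len(frac_digits))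
-- ===== Notes on version B (the rewrite author's own statement) =====
-- stated objective: simpler
-- what changed: B splits the string at the first '.' and filters each part for digits, computing the divisor as a closed-form power 10**len(frac_digits) instead of A's interleaved character scan with a point_met flag and a running multiply.
import Mathlib
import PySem

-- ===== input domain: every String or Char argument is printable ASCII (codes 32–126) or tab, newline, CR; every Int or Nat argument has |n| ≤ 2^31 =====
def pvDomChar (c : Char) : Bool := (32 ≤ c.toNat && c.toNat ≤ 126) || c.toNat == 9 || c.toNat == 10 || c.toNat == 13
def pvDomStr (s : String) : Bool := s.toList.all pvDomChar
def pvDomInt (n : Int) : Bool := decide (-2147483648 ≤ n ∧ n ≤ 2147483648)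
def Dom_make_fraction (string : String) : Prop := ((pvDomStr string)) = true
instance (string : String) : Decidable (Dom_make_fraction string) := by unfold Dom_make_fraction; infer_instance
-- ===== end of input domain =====

-- B splits at the first '.' and filters digits per part, divisor = 10 ^ #frac_digits (closed form),
-- instead of A's single interleaved scan with a point_met flag and running multiply; objective: simpler.


-- ===== PORT A =====
-- A's membership test: char in "1234567890"
def digA (c : Char) : Bool := "1234567890".toList.contains c

-- the loop body of A (dividend kept as its list of characters)
def mfStep (s : List Char × Int × Bool) (c : Char) : List Char × Int × Bool :=
  let s := if digA c then
             (s.1 ++ [c], (if s.2.2 then s.2.1 * 10 else s.2.1), s.2.2)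
           else s
  if c = '.' then (s.1, s.2.1, true) else s

def make_fraction (string : String) : Int × Int :=
  let st := string.toList.foldl mfStep ([], 1, false)
  -- int(dividend): ValueError (dividend = "") is excluded by Pre_make_fraction
  ((PySem.Int.ofChars? st.1).getD 0, st.2.1)

-- ===== PORT B =====
-- B's membership test: char in '0123456789'
def digB (c : Char) : Bool := "0123456789".toList.contains c

def make_fraction_alt (string : String) : Int × Int :=
  let cs := string.toList
  -- string.partition('.'): split at the first '.' (hand port, exact: tail drops the separator, tail [] = [])
  let int_part := cs.takeWhile (· ≠ '.')
  let frac_part := (cs.dropWhile (· ≠ '.')).tail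
  let int_digits := int_part.filter digB
  let frac_digits := frac_part.filter digB
  -- int(...): ValueError (no digits at all) is excluded by Pre_make_fraction
  ((PySem.Int.ofChars? (int_digits ++ frac_digits)).getD 0, (10 : Int) ^ frac_digits.length)

-- ===== PRECONDITION & SPEC =====
-- Pre_ excludes strings containing no decimal digit: there Python A (and Python B) raises ValueError on int('').
def Pre_make_fraction (string : String) : Prop := (string.toList.any digB) = true
instance (string : String) : Decidable (Pre_make_fraction string) := by unfold Pre_make_fraction; infer_instance
def pvWitness_make_fraction : String := "12.34"
def Spec_make_fraction (string : String) (out : Int × Int) : Prop := out = make_fraction_alt string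
instance (string : String) (out : Int × Int) : Decidable (Spec_make_fraction string out) := by unfold Spec_make_fraction; infer_instance

-- ===== CLAIM (what is proved, stated in full; the proofs are below) =====
def Claim_equal_make_fraction : Prop := ∀ (string : String), Dom_make_fraction string → Pre_make_fraction string → Spec_make_fraction string (make_fraction string)

-- ===== LEMMAS AND PROOFS =====

-- A's digit string and B's digit string test the same set of characters
theorem dig_comm : digA = digB := by
  funext c
  rw [Bool.eq_iff_iff]
  simp [digA, digB, List.contains_eq_mem]
  tauto

theorem dot_not_dig : digA '.' = false := by decide

-- after the point was met, every digit multiplies the divisor by 10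
theorem foldl_step_true (cs : List Char) (d : List Char) (v : Int) :
    cs.foldl mfStep (d, v, true) =
      (d ++ cs.filter digA, v * 10 ^ (cs.filter digA).length, true) := by
  induction cs generalizing d v with
  | nil => simp
  | cons c cs ih =>
    by_cases hd : digA c = true
    · have hc : c ≠ '.' := by intro h; rw [h, dot_not_dig] at hd; cases hd
      simp only [List.foldl_cons, mfStep, hd, if_true, hc, if_false]
      rw [ih]
      simp [hd, pow_succ]
      ring
    · simp only [Bool.not_eq_true] at hd
      by_cases hc : c = '.'
      · subst hc
        simp only [List.foldl_cons, mfStep, hd, Bool.false_eq_true, if_false, if_true]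
        rw [ih]
        simp [hd]
      · simp only [List.foldl_cons, mfStep, hd, Bool.false_eq_true, if_false, if_neg hc]
        rw [ih]
        simp [hd]

-- before the point is met the divisor is untouched; the fold splits at the first '.'
theorem foldl_step_false (cs : List Char) (d : List Char) (v : Int) :
    (cs.foldl mfStep (d, v, false)).1 = d ++ cs.filter digA ∧
    (cs.foldl mfStep (d, v, false)).2.1 =
      v * 10 ^ (((cs.dropWhile (· ≠ '.')).tail).filter digA).length := by
  induction cs generalizing d v with
  | nil => simp
  | cons c cs ih =>
    by_cases hc : c = '.'
    · subst hc
      simp only [List.foldl_cons, mfStep, dot_not_dig, Bool.false_eq_true, if_false, if_true]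
      rw [foldl_step_true]
      simp [dot_not_dig]
    · have hdrop : (c :: cs).dropWhile (· ≠ '.') = cs.dropWhile (· ≠ '.') := by
        simp [hc]
      by_cases hd : digA c = true
      · simp only [List.foldl_cons, mfStep, hd, if_true, if_neg hc, hdrop]
        obtain ⟨i1, i2⟩ := ih (d ++ [c]) v
        exact ⟨by simp [i1, hd], i2⟩
      · simp only [Bool.not_eq_true] at hd
        simp only [List.foldl_cons, mfStep, hd, Bool.false_eq_true, if_false, if_neg hc, hdrop]
        obtain ⟨i1, i2⟩ := ih d v
        exact ⟨by simp [i1, hd], i2⟩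

-- the head of dropWhile (· ≠ '.') is the dot
theorem dropWhile_head_dot (cs : List Char) (c : Char) (rest : List Char)
    (h : cs.dropWhile (· ≠ '.') = c :: rest) : c = '.' := by
  induction cs with
  | nil => simp at h
  | cons a as ih =>
    by_cases ha : a = '.'
    · rw [List.dropWhile_cons, if_neg (by simp [ha])] at h
      rw [← (List.cons.injEq _ _ _ _).mp h |>.1, ha]
    · rw [List.dropWhile_cons, if_pos (by simp [ha])] at h
      exact ih h

-- the digits of the whole string are the digits before the first '.' followed by those after it
theorem filter_split (cs : List Char) :
    cs.filter digA =
      (cs.takeWhile (· ≠ '.')).filter digA ++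
      ((cs.dropWhile (· ≠ '.')).tail).filter digA := by
  conv_lhs => rw [← List.takeWhile_append_dropWhile (p := (· ≠ '.')) (l := cs)]
  rw [List.filter_append]
  congr 1
  rcases h : cs.dropWhile (· ≠ '.') with _ | ⟨c, rest⟩
  · simp
  · have hc := dropWhile_head_dot cs c rest h
    subst hc
    simp [dot_not_dig]

-- ===== VERDICT (by name: the statement is the Claim_ definition above) =====
theorem make_fraction_spec : Claim_equal_make_fraction := by
  intro s _ _
  unfold Spec_make_fraction make_fraction make_fraction_alt
  obtain ⟨h1, h2⟩ := foldl_step_false s.toList [] 1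
  rw [Prod.ext_iff]
  constructor
  · simp only [h1, List.nil_append, ← dig_comm]
    rw [filter_split]
  · simp only [h2, one_mul, dig_comm]
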